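-- pv_equiv track=rewrite | github.com/vujnovicmarko/Prevodenje_programskih_jezika | lab2/pomocne.py | dohvatljivaStanja
-- ===== SOURCE A (Python) =====
-- import queue
--
-- def dohvatljivaStanja(prijelazi, poc_stanje, sviZnakovi):
--     rezultat = set()
--     rezultat.add(poc_stanje)
--     q = queue.Queue()
--     q.put(poc_stanje)
--
--     while not q.empty():
--         stanje = q.get()
--         stanje = stanje[1:-1].split("|")
--         for slovo in sviZnakovi:
--             slj_stanja = set()
--             for s in stanje:
--                 slj_stanja = slj_stanja.union(prijelazi[s][slovo])
--             slj_stanja = "[" + "|".join(sorted(list(slj_stanja))) + "]"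
--             if slj_stanja not in rezultat and slj_stanja != "[]":
--                 rezultat.add(slj_stanja)
--                 q.put(slj_stanja)
--
--     return rezultat
-- ===== SOURCE B (Python) =====
-- def dohvatljivaStanja(prijelazi, poc_stanje, sviZnakovi):
--     rezultat = [poc_stanje]
--     prije = 0
--     while prije != len(rezultat):
--         prije = len(rezultat)
--         for stanje in list(rezultat):
--             dijelovi = stanje[1:-1].split("|")
--             for slovo in sviZnakovi:
--                 sljedece = set()
--                 for s in dijelovi:
--                     sljedece = sljedece.union(prijelazi[s][slovo])
--                 kod = "[" + "|".join(sorted(sljedece)) + "]"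
--                 if kod != "[]" and kod not in rezultat:
--                     rezultat.append(kod)
--     return set(rezultat)
-- ===== Notes on version B (the rewrite author's own statement) =====
-- stated objective: alternative
-- what changed: The BFS worklist (queue.Queue of pending states) is replaced by a round-based fixpoint computation: each round sweeps a snapshot of the whole discovered set, adds every new successor, and the loop stops when a full sweep adds nothing.
-- outside the precondition, e.g. on dohvatljivaStanja({'a': {'0': {''}}, '': {}}, '[a]', ['0']): A returns {'[a]'}, B returns {'[a]'}
import Mathlib
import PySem

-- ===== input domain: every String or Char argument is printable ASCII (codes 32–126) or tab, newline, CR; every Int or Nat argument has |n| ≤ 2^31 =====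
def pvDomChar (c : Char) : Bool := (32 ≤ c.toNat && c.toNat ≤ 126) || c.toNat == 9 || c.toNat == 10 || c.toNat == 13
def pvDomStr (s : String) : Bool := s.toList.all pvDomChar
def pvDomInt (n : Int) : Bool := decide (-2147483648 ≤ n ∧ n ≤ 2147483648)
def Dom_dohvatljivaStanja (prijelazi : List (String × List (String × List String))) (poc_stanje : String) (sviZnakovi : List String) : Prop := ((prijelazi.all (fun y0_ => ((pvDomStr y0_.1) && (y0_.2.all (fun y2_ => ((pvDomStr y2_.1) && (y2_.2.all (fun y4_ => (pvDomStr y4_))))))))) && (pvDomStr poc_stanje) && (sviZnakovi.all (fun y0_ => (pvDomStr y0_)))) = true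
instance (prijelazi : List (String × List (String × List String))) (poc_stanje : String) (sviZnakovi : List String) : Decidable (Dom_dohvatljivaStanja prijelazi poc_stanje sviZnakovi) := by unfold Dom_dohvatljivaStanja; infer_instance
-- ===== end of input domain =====

-- B replaces A's BFS worklist by repeated whole-set fixpoint sweeps (alternative decomposition, not faster);
-- the inner successor computation (parse / union / sort / re-encode) is identical in both sources and is shared below.

-- ===== PORT A =====
-- stanje[1:-1].split("|")  (split? with the nonempty separator "|" never returns none)
def pvDijelovi (stanje : String) : List String :=
  (PySem.Str.split? (PySem.Str.slice stanje (some 1) (some (-1))) "|").getD []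

-- prijelazi[s][slovo]; Python raises KeyError on a missing key — such inputs are excluded by Pre_
def pvPrijelaz (prijelazi : List (String × List (String × List String))) (s slovo : String) : List String :=
  PySem.Dict.getD (PySem.Dict.mk (PySem.Dict.getD (PySem.Dict.mk prijelazi) s [])) slovo []

-- "[" + "|".join(sorted(union of prijelazi[s][slovo] over s in dijelovi)) + "]"  (identical line in Source A and Source B)
def pvSljedece (prijelazi : List (String × List (String × List String))) (dijelovi : List String) (slovo : String) : String :=
  let u : PySem.Set String := dijelovi.foldl (fun acc s => PySem.Set.union acc (pvPrijelaz prijelazi s slovo)) PySem.Set.empty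
  String.ofList ('[' :: PySem.Chars.join ['|'] ((PySem.List.sorted u (fun x => x) false).map String.toList) ++ [']'])

-- all strings occurring in transition values (used only for the termination fuel of the ports)
def pvSvemir (prijelazi : List (String × List (String × List String))) : List String :=
  prijelazi.flatMap (fun kd => kd.2.flatMap (fun sv => sv.2))

-- fuel: the loops only ever see distinct states of the form '[' ++ sorted subset of pvSvemir ++ ']' plus poc_stanje
def pvGorivo (prijelazi : List (String × List (String × List String))) : Nat :=
  2 ^ (pvSvemir prijelazi).length + 2

-- A's while-loop: rezultat (insertion-ordered set) and the FIFO queue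
def dohvatljivaStanjaPetlja (prijelazi : List (String × List (String × List String))) (sviZnakovi : List String) : Nat → List String → List String → List String
  | 0, rezultat, _ => rezultat
  | _ + 1, rezultat, [] => rezultat
  | fuel + 1, rezultat, stanje :: q =>
      let dijelovi := pvDijelovi stanje
      let rq := sviZnakovi.foldl (fun (rq : List String × List String) slovo =>
          let slj := pvSljedece prijelazi dijelovi slovo
          if slj ∉ rq.1 ∧ slj ≠ "[]" then (rq.1 ++ [slj], rq.2 ++ [slj]) else rq)
        (rezultat, q)
      dohvatljivaStanjaPetlja prijelazi sviZnakovi fuel rq.1 rq.2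

def dohvatljivaStanja (prijelazi : List (String × List (String × List String))) (poc_stanje : String) (sviZnakovi : List String) : List String :=
  dohvatljivaStanjaPetlja prijelazi sviZnakovi (pvGorivo prijelazi) [poc_stanje] [poc_stanje]

-- ===== PORT B =====
-- one state of the snapshot processed against the growing rezultat
def pvObradi (prijelazi : List (String × List (String × List String))) (sviZnakovi : List String) (cur : List String) (stanje : String) : List String :=
  let dijelovi := pvDijelovi stanje
  sviZnakovi.foldl (fun cur2 slovo =>
      let kod := pvSljedece prijelazi dijelovi slovo
      if kod ≠ "[]" ∧ kod ∉ cur2 then cur2 ++ [kod] else cur2) cur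

-- one sweep: 'for stanje in list(rezultat): …' over the snapshot taken at round start
def pvKrug (prijelazi : List (String × List (String × List String))) (sviZnakovi : List String) (rezultat : List String) : List String :=
  rezultat.foldl (pvObradi prijelazi sviZnakovi) rezultat

-- 'while prije != len(rezultat): prije = len(rezultat); sweep'
def dohvatljivaStanjaAltPetlja (prijelazi : List (String × List (String × List String))) (sviZnakovi : List String) : Nat → List String → List String
  | 0, rezultat => rezultat
  | fuel + 1, rezultat =>
      let prije := rezultat.length
      let rezultat' := pvKrug prijelazi sviZnakovi rezultat
      if prije = rezultat'.length then rezultat' else dohvatljivaStanjaAltPetlja prijelazi sviZnakovi fuel rezultat'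

def dohvatljivaStanja_alt (prijelazi : List (String × List (String × List String))) (poc_stanje : String) (sviZnakovi : List String) : List String :=
  dohvatljivaStanjaAltPetlja prijelazi sviZnakovi (pvGorivo prijelazi) [poc_stanje]

-- ===== PRECONDITION & SPEC =====
-- the keys reachable from poc_stanje's components along sviZnakovi-labelled transition values
def pvDosegKorak (prijelazi : List (String × List (String × List String))) (sviZnakovi : List String) (S : PySem.Set String) : PySem.Set String :=
  PySem.Set.update S (S.flatMap (fun k =>
    (PySem.Dict.getD (PySem.Dict.mk prijelazi) k []).flatMap (fun sv => if sv.1 ∈ sviZnakovi then sv.2 else [])))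

def pvDoseg (prijelazi : List (String × List (String × List String))) (sviZnakovi : List String) (poc_stanje : String) : List String :=
  (pvDosegKorak prijelazi sviZnakovi)^[prijelazi.length + 1] (PySem.Set.ofList (pvDijelovi poc_stanje))

-- Pre_ excludes inputs on which Python A raises KeyError: unless sviZnakovi is empty (then A performs no lookup
-- at all), every key reachable from poc_stanje's components must be present in prijelazi, its row must contain
-- every letter of sviZnakovi, and its values for those letters must be '|'-free (so state strings re-parse into
-- keys).  This still excludes rare inputs on which A returns ('|'-containing values whose pieces happen to be
-- keys, or keys reachable only through an all-empty union, i.e. through the skipped state '[]'); A and B return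
-- the same value on those (see the claim cites).
def Pre_dohvatljivaStanja (prijelazi : List (String × List (String × List String))) (poc_stanje : String) (sviZnakovi : List String) : Prop :=
  sviZnakovi = [] ∨
  ∀ k ∈ pvDoseg prijelazi sviZnakovi poc_stanje,
    k ∈ prijelazi.map Prod.fst ∧
    (∀ slovo ∈ sviZnakovi, slovo ∈ (PySem.Dict.getD (PySem.Dict.mk prijelazi) k []).map Prod.fst) ∧
    (∀ sv ∈ PySem.Dict.getD (PySem.Dict.mk prijelazi) k [], sv.1 ∈ sviZnakovi → ∀ v ∈ sv.2, '|' ∉ v.toList)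
instance (prijelazi : List (String × List (String × List String))) (poc_stanje : String) (sviZnakovi : List String) : Decidable (Pre_dohvatljivaStanja prijelazi poc_stanje sviZnakovi) := by unfold Pre_dohvatljivaStanja; infer_instance

def pvWitness_dohvatljivaStanja : (List (String × List (String × List String))) × String × List String :=
  ([("a", [("0", ["a", "b"]), ("1", ["b"])]), ("b", [("0", []), ("1", ["a"])])], "[a]", ["0", "1"])

def Spec_dohvatljivaStanja (prijelazi : List (String × List (String × List String))) (poc_stanje : String) (sviZnakovi : List String) (out : List String) : Prop := out = dohvatljivaStanja_alt prijelazi poc_stanje sviZnakovi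
instance (prijelazi : List (String × List (String × List String))) (poc_stanje : String) (sviZnakovi : List String) (out : List String) : Decidable (Spec_dohvatljivaStanja prijelazi poc_stanje sviZnakovi out) := by unfold Spec_dohvatljivaStanja; infer_instance

-- ===== CLAIM (what is proved, stated in full; the proofs are below) =====
def Claim_equal_dohvatljivaStanja : Prop := ∀ (prijelazi : List (String × List (String × List String))) (poc_stanje : String) (sviZnakovi : List String), Dom_dohvatljivaStanja prijelazi poc_stanje sviZnakovi → Pre_dohvatljivaStanja prijelazi poc_stanje sviZnakovi → Spec_dohvatljivaStanja prijelazi poc_stanje sviZnakovi (dohvatljivaStanja prijelazi poc_stanje sviZnakovi)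

-- ===== LEMMAS AND PROOFS =====
-- (The equivalence is in fact proved for ALL inputs; Pre_'s role is only Python-exactness of the ports.)

-- the sorted universe of possible successor-state bodies, and the finite state universe V
def pvSortU (p : List (String × List (String × List String))) : List String :=
  PySem.List.sorted (PySem.Set.ofList (pvSvemir p)) (fun x => x) false

def pvKodOf (l : List String) : String :=
  String.ofList ('[' :: PySem.Chars.join ['|'] (l.map String.toList) ++ [']'])

def pvVtail (p : List (String × List (String × List String))) : List String :=
  (pvSortU p).sublists.map pvKodOf

def pvV (p : List (String × List (String × List String))) (poc : String) : List String :=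
  poc :: pvVtail p

-- saturation: every successor of st is already recorded (or is the empty state)
def pvSat (p : List (String × List (String × List String))) (svi : List String) (R : List String) (st : String) : Prop :=
  ∀ slovo ∈ svi, pvSljedece p (pvDijelovi st) slovo = "[]" ∨ pvSljedece p (pvDijelovi st) slovo ∈ R

theorem pvSat_mono (p : List (String × List (String × List String))) (svi R R' : List String) (st : String)
    (h : pvSat p svi R st) (hsub : R ⊆ R') : pvSat p svi R' st := by
  intro slovo hs
  rcases h slovo hs with h' | h'
  · exact Or.inl h'
  · exact Or.inr (hsub h')

-- generic: any fold whose step only appends keeps its start as a prefix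
theorem pvFoldl_prefix {α β : Type} (g : List α → β → List α)
    (hg : ∀ cur b, cur <+: g cur b) : ∀ (l : List β) (cur : List α), cur <+: l.foldl g cur := by
  intro l
  induction l with
  | nil => intro cur; exact List.prefix_refl _
  | cons b t ih => intro cur; exact (hg cur b).trans (ih (g cur b))

theorem pvObradi_step_prefix (p : List (String × List (String × List String))) (d : List String)
    (cur2 : List String) (slovo : String) :
    cur2 <+: (if pvSljedece p d slovo ≠ "[]" ∧ pvSljedece p d slovo ∉ cur2 then cur2 ++ [pvSljedece p d slovo] else cur2) := by
  split
  · exact List.prefix_append _ _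
  · exact List.prefix_refl _

theorem pvObradi_prefix (p : List (String × List (String × List String))) (svi : List String)
    (cur : List String) (st : String) : cur <+: pvObradi p svi cur st := by
  simp only [pvObradi]
  exact pvFoldl_prefix _ (fun cur2 slovo => pvObradi_step_prefix p (pvDijelovi st) cur2 slovo) svi cur

theorem pvFoldlObradi_prefix (p : List (String × List (String × List String))) (svi : List String)
    (q R : List String) : R <+: q.foldl (pvObradi p svi) R :=
  pvFoldl_prefix _ (fun cur st => pvObradi_prefix p svi cur st) q R

-- after processing st, st is saturated
theorem pvSat_obradi_aux (p : List (String × List (String × List String))) (d : List String) :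
    ∀ (l : List String) (cur : List String) (slovo : String), slovo ∈ l →
      pvSljedece p d slovo = "[]" ∨
      pvSljedece p d slovo ∈ l.foldl (fun cur2 slovo =>
        if pvSljedece p d slovo ≠ "[]" ∧ pvSljedece p d slovo ∉ cur2 then cur2 ++ [pvSljedece p d slovo] else cur2) cur := by
  intro l
  induction l with
  | nil => intro cur slovo h; cases h
  | cons a t ih =>
    intro cur slovo h
    rw [List.foldl_cons]
    rcases List.mem_cons.mp h with h | h
    · subst h
      by_cases h1 : pvSljedece p d slovo = "[]"
      · exact Or.inl h1
      · right
        have hmem : pvSljedece p d slovo ∈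
            (if pvSljedece p d slovo ≠ "[]" ∧ pvSljedece p d slovo ∉ cur then cur ++ [pvSljedece p d slovo] else cur) := by
          split
          · simp
          · rename_i hneg
            rcases not_and_or.mp hneg with hc | hc
            · exact absurd (not_not.mp hc) h1
            · simpa using not_not.mp hc
        exact (pvFoldl_prefix _ (fun cur2 slovo => pvObradi_step_prefix p d cur2 slovo) t _).subset hmem
    · exact ih _ slovo h

theorem pvSat_obradi (p : List (String × List (String × List String))) (svi : List String)
    (cur : List String) (st : String) : pvSat p svi (pvObradi p svi cur st) st := by
  intro slovo hs
  simp only [pvObradi]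
  exact pvSat_obradi_aux p (pvDijelovi st) svi cur slovo hs

-- a saturated state adds nothing
theorem pvObradi_id_aux (p : List (String × List (String × List String))) (d : List String) :
    ∀ (l : List String) (cur : List String),
      (∀ slovo ∈ l, pvSljedece p d slovo = "[]" ∨ pvSljedece p d slovo ∈ cur) →
      l.foldl (fun cur2 slovo =>
        if pvSljedece p d slovo ≠ "[]" ∧ pvSljedece p d slovo ∉ cur2 then cur2 ++ [pvSljedece p d slovo] else cur2) cur = cur := by
  intro l
  induction l with
  | nil => intro cur _; rfl
  | cons a t ih =>
    intro cur h
    rw [List.foldl_cons]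
    have hstep : (if pvSljedece p d a ≠ "[]" ∧ pvSljedece p d a ∉ cur then cur ++ [pvSljedece p d a] else cur) = cur := by
      rcases h a (by simp) with h' | h'
      · rw [if_neg]; intro hc; exact hc.1 h'
      · rw [if_neg]; intro hc; exact hc.2 h'
    rw [hstep]
    exact ih cur (fun slovo hs => h slovo (by simp [hs]))

theorem pvObradi_id (p : List (String × List (String × List String))) (svi : List String)
    (cur : List String) (st : String) (h : pvSat p svi cur st) : pvObradi p svi cur st = cur := by
  simp only [pvObradi]
  exact pvObradi_id_aux p (pvDijelovi st) svi cur h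

theorem pvFoldlObradi_id (p : List (String × List (String × List String))) (svi : List String) :
    ∀ (P R : List String), (∀ st ∈ P, pvSat p svi R st) → P.foldl (pvObradi p svi) R = R := by
  intro P
  induction P with
  | nil => intro R _; rfl
  | cons st t ih =>
    intro R h
    rw [List.foldl_cons, pvObradi_id p svi R st (h st (by simp))]
    exact ih R (fun st' hs => h st' (by simp [hs]))

-- processed states of q are saturated in q.foldl obradi R
theorem pvSat_foldl (p : List (String × List (String × List String))) (svi : List String) :
    ∀ (q R : List String) (st : String), st ∈ q → pvSat p svi (q.foldl (pvObradi p svi) R) st := by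
  intro q
  induction q with
  | nil => intro R st h; cases h
  | cons a t ih =>
    intro R st h
    rw [List.foldl_cons]
    rcases List.mem_cons.mp h with h | h
    · subst h
      exact pvSat_mono p svi _ _ st (pvSat_obradi p svi R st) (pvFoldlObradi_prefix p svi t _).subset
    · exact ih _ st h

-- A's paired fold = B's single-state sweep plus the new states appended to the queue
theorem pvStepA (p : List (String × List (String × List String))) (d : List String) :
    ∀ (l : List String) (R q : List String),
      l.foldl (fun (rq : List String × List String) slovo =>
          let slj := pvSljedece p d slovo
          if slj ∉ rq.1 ∧ slj ≠ "[]" then (rq.1 ++ [slj], rq.2 ++ [slj]) else rq) (R, q)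
      = (l.foldl (fun cur2 slovo =>
            if pvSljedece p d slovo ≠ "[]" ∧ pvSljedece p d slovo ∉ cur2 then cur2 ++ [pvSljedece p d slovo] else cur2) R,
         q ++ (l.foldl (fun cur2 slovo =>
            if pvSljedece p d slovo ≠ "[]" ∧ pvSljedece p d slovo ∉ cur2 then cur2 ++ [pvSljedece p d slovo] else cur2) R).drop R.length) := by
  intro l
  induction l with
  | nil =>
    intro R q
    simp [List.drop_length]
  | cons a t ih =>
    intro R q
    rw [List.foldl_cons, List.foldl_cons]
    by_cases h1 : pvSljedece p d a ∈ R
    · have e1 : (if pvSljedece p d a ∉ R ∧ pvSljedece p d a ≠ "[]" then (R ++ [pvSljedece p d a], q ++ [pvSljedece p d a]) else (R, q)) = ((R : List String), (q : List String)) := by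
        rw [if_neg]; intro hc; exact hc.1 h1
      have e2 : (if pvSljedece p d a ≠ "[]" ∧ pvSljedece p d a ∉ R then R ++ [pvSljedece p d a] else R) = R := by
        rw [if_neg]; intro hc; exact hc.2 h1
      simp only
      rw [e1, e2]
      exact ih R q
    · by_cases h2 : pvSljedece p d a = "[]"
      · have e1 : (if pvSljedece p d a ∉ R ∧ pvSljedece p d a ≠ "[]" then (R ++ [pvSljedece p d a], q ++ [pvSljedece p d a]) else (R, q)) = ((R : List String), (q : List String)) := by
          rw [if_neg]; intro hc; exact hc.2 h2
        have e2 : (if pvSljedece p d a ≠ "[]" ∧ pvSljedece p d a ∉ R then R ++ [pvSljedece p d a] else R) = R := by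
          rw [if_neg]; intro hc; exact hc.1 h2
        simp only
        rw [e1, e2]
        exact ih R q
      · have e1 : (if pvSljedece p d a ∉ R ∧ pvSljedece p d a ≠ "[]" then (R ++ [pvSljedece p d a], q ++ [pvSljedece p d a]) else (R, q)) = (R ++ [pvSljedece p d a], q ++ [pvSljedece p d a]) := by
          rw [if_pos ⟨h1, h2⟩]
        have e2 : (if pvSljedece p d a ≠ "[]" ∧ pvSljedece p d a ∉ R then R ++ [pvSljedece p d a] else R) = R ++ [pvSljedece p d a] := by
          rw [if_pos ⟨h2, h1⟩]
        simp only
        rw [e1, e2, ih (R ++ [pvSljedece p d a]) (q ++ [pvSljedece p d a])]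
        obtain ⟨e, he⟩ := pvFoldl_prefix _ (fun cur2 slovo => pvObradi_step_prefix p d cur2 slovo) t (R ++ [pvSljedece p d a])
        rw [← he]
        have hd1 : List.drop (R ++ [pvSljedece p d a]).length (R ++ [pvSljedece p d a] ++ e) = e :=
          List.drop_left
        have hd2 : List.drop R.length (R ++ ([pvSljedece p d a] ++ e)) = [pvSljedece p d a] ++ e :=
          List.drop_left
        rw [Prod.mk.injEq]
        refine ⟨rfl, ?_⟩
        rw [hd1, List.append_assoc R, hd2, List.append_assoc]

-- chunk helper: one iteration of A's loop
theorem pvALoop_cons (p : List (String × List (String × List String))) (svi : List String)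
    (f : Nat) (R : List String) (st : String) (rest : List String) :
    dohvatljivaStanjaPetlja p svi (f + 1) R (st :: rest)
    = dohvatljivaStanjaPetlja p svi f (pvObradi p svi R st)
        (rest ++ (pvObradi p svi R st).drop R.length) := by
  have h := pvStepA p (pvDijelovi st) svi R rest
  show dohvatljivaStanjaPetlja p svi f
      (svi.foldl (fun (rq : List String × List String) slovo =>
          let slj := pvSljedece p (pvDijelovi st) slovo
          if slj ∉ rq.1 ∧ slj ≠ "[]" then (rq.1 ++ [slj], rq.2 ++ [slj]) else rq) (R, rest)).1
      (svi.foldl (fun (rq : List String × List String) slovo =>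
          let slj := pvSljedece p (pvDijelovi st) slovo
          if slj ∉ rq.1 ∧ slj ≠ "[]" then (rq.1 ++ [slj], rq.2 ++ [slj]) else rq) (R, rest)).2
      = dohvatljivaStanjaPetlja p svi f (pvObradi p svi R st)
        (rest ++ (pvObradi p svi R st).drop R.length)
  rw [h]
  simp [pvObradi]

-- chunk lemma: A's loop processes the first |q| queue entries exactly as one fold of sweeps
theorem pvChunkA (p : List (String × List (String × List String))) (svi : List String) :
    ∀ (q R extra : List String) (f : Nat),
      dohvatljivaStanjaPetlja p svi (q.length + f) R (q ++ extra)
      = dohvatljivaStanjaPetlja p svi f (q.foldl (pvObradi p svi) R)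
          (extra ++ (q.foldl (pvObradi p svi) R).drop R.length) := by
  intro q
  induction q with
  | nil =>
    intro R extra f
    simp [List.drop_length]
  | cons st q ih =>
    intro R extra f
    have hlen : (st :: q).length + f = (q.length + f) + 1 := by simp; omega
    rw [hlen, List.cons_append, pvALoop_cons p svi (q.length + f) R st (q ++ extra)]
    obtain ⟨e1, he1⟩ := pvObradi_prefix p svi R st
    rw [List.append_assoc, ih (pvObradi p svi R st) (extra ++ (pvObradi p svi R st).drop R.length) f]
    obtain ⟨e2, he2⟩ := pvFoldlObradi_prefix p svi q (pvObradi p svi R st)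
    rw [List.foldl_cons, ← he2, ← he1]
    have hd0 : List.drop R.length (R ++ e1) = e1 := List.drop_left
    have hd1 : List.drop (R ++ e1).length (R ++ e1 ++ e2) = e2 := List.drop_left
    have hd2 : List.drop R.length (R ++ (e1 ++ e2)) = e1 ++ e2 := List.drop_left
    rw [hd0, hd1, List.append_assoc R e1 e2, hd2, List.append_assoc]

theorem pvALoop_nil (p : List (String × List (String × List String))) (svi : List String)
    (f : Nat) (R : List String) : dohvatljivaStanjaPetlja p svi f R [] = R := by
  cases f <;> rfl

-- nodup preservation
theorem pvObradi_nodup_aux (p : List (String × List (String × List String))) (d : List String) :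
    ∀ (l : List String) (cur : List String), cur.Nodup →
      (l.foldl (fun cur2 slovo =>
        if pvSljedece p d slovo ≠ "[]" ∧ pvSljedece p d slovo ∉ cur2 then cur2 ++ [pvSljedece p d slovo] else cur2) cur).Nodup := by
  intro l
  induction l with
  | nil => intro cur h; exact h
  | cons a t ih =>
    intro cur h
    rw [List.foldl_cons]
    refine ih _ ?_
    split
    · rename_i hc
      simp [List.nodup_append, h]
      intro a1 ha1 he
      exact hc.2 (he ▸ ha1)
    · exact h

theorem pvObradi_nodup (p : List (String × List (String × List String))) (svi : List String)
    (cur : List String) (st : String) (h : cur.Nodup) : (pvObradi p svi cur st).Nodup := by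
  simp only [pvObradi]
  exact pvObradi_nodup_aux p (pvDijelovi st) svi cur h

theorem pvFoldlObradi_nodup (p : List (String × List (String × List String))) (svi : List String) :
    ∀ (q R : List String), R.Nodup → (q.foldl (pvObradi p svi) R).Nodup := by
  intro q
  induction q with
  | nil => intro R h; exact h
  | cons a t ih => intro R h; exact ih _ (pvObradi_nodup p svi R a h)

-- membership in the universe
theorem pvDictGet?_mem {ν : Type} (l : List (String × ν)) (k : String) (v : ν)
    (h : PySem.Dict.get? (PySem.Dict.mk l) k = some v) : (k, v) ∈ l := by
  induction l with
  | nil => simp [PySem.Dict.get?] at h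
  | cons kv rest ih =>
    obtain ⟨k0, v0⟩ := kv
    rw [PySem.Dict.get?_mk_cons] at h
    split at h
    · rename_i hbeq
      have h1 : k0 = k := eq_of_beq hbeq
      have h2 : v0 = v := by injection h
      subst h1; subst h2
      simp
    · exact List.mem_cons_of_mem _ (ih h)

theorem pvPrijelaz_subset (p : List (String × List (String × List String))) (s slovo v : String)
    (h : v ∈ pvPrijelaz p s slovo) : v ∈ pvSvemir p := by
  unfold pvPrijelaz at h
  rw [PySem.Dict.getD_eq_get?_getD] at h
  cases hg : PySem.Dict.get? (PySem.Dict.mk (PySem.Dict.getD (PySem.Dict.mk p) s [])) slovo with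
  | none => rw [hg] at h; simp at h
  | some vals =>
    rw [hg] at h
    have hin : (slovo, vals) ∈ PySem.Dict.getD (PySem.Dict.mk p) s [] := pvDictGet?_mem _ _ _ hg
    rw [PySem.Dict.getD_eq_get?_getD] at hin
    cases hg2 : PySem.Dict.get? (PySem.Dict.mk p) s with
    | none => rw [hg2] at hin; simp at hin
    | some d' =>
      rw [hg2] at hin
      have hd' : (s, d') ∈ p := pvDictGet?_mem _ _ _ hg2
      simp only [pvSvemir, List.mem_flatMap]
      exact ⟨(s, d'), hd', (slovo, vals), hin, h⟩

theorem pvSljedece_mem_Vtail (p : List (String × List (String × List String))) (d : List String)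
    (slovo : String) : pvSljedece p d slovo ∈ pvVtail p := by
  have hnd : (d.foldl (fun acc s => PySem.Set.union acc (pvPrijelaz p s slovo)) PySem.Set.empty).Nodup := by
    have : ∀ (l : List String) (acc : PySem.Set String), acc.Nodup →
        (l.foldl (fun acc s => PySem.Set.union acc (pvPrijelaz p s slovo)) acc).Nodup := by
      intro l
      induction l with
      | nil => intro acc h; exact h
      | cons a t ih => intro acc h; exact ih _ (PySem.Set.nodup_union _ _ h)
    exact this d _ List.nodup_nil
  have hsub : ∀ x ∈ d.foldl (fun acc s => PySem.Set.union acc (pvPrijelaz p s slovo)) PySem.Set.empty,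
      x ∈ pvSvemir p := by
    have : ∀ (l : List String) (acc : PySem.Set String),
        (∀ x ∈ acc, x ∈ pvSvemir p) →
        ∀ x ∈ l.foldl (fun acc s => PySem.Set.union acc (pvPrijelaz p s slovo)) acc, x ∈ pvSvemir p := by
      intro l
      induction l with
      | nil => intro acc h; exact h
      | cons a t ih =>
        intro acc h
        refine ih _ ?_
        intro x hx
        rcases (PySem.Set.mem_union _ _ _).mp hx with hx | hx
        · exact h x hx
        · exact pvPrijelaz_subset p a slovo x hx
    exact this d _ (by intro x hx; simp [PySem.Set.empty] at hx)
  set u := d.foldl (fun acc s => PySem.Set.union acc (pvPrijelaz p s slovo)) PySem.Set.empty with hu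
  have hsnd : (PySem.List.sorted u (fun x => x) false).Nodup :=
    (PySem.List.sorted_perm u (fun x => x) false).nodup_iff.mpr hnd
  have hlt : (PySem.List.sorted u (fun x => x) false).Pairwise (· < ·) := by
    have h1 := PySem.List.sorted_pairwise u (fun x => x)
    exact (h1.and hsnd).imp (fun h => lt_of_le_of_ne h.1 h.2)
  have hltU : (pvSortU p).Pairwise (· < ·) := PySem.List.sorted_ofList_pairwise_lt (pvSvemir p)
  have hss : (PySem.List.sorted u (fun x => x) false) ⊆ pvSortU p := by
    intro x hx
    rw [PySem.List.mem_sorted] at hx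
    unfold pvSortU
    rw [PySem.List.mem_sorted, PySem.Set.mem_ofList]
    exact hsub x hx
  have hsl : (PySem.List.sorted u (fun x => x) false).Sublist (pvSortU p) :=
    @List.sublist_of_subperm_of_pairwise _ _ ⟨fun _ _ h h' => absurd h (lt_asymm h')⟩ _ _
      (hsnd.subperm hss) hlt hltU
  show pvKodOf (PySem.List.sorted u (fun x => x) false) ∈ pvVtail p
  exact List.mem_map_of_mem (List.mem_sublists.mpr hsl)

theorem pvObradi_subset (p : List (String × List (String × List String))) (svi : List String)
    (cur : List String) (st : String) : ∀ x ∈ pvObradi p svi cur st, x ∈ cur ∨ x ∈ pvVtail p := by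
  simp only [pvObradi]
  have main : ∀ (l : List String) (cur0 : List String),
      ∀ x ∈ l.foldl (fun cur2 slovo =>
        if pvSljedece p (pvDijelovi st) slovo ≠ "[]" ∧ pvSljedece p (pvDijelovi st) slovo ∉ cur2 then
          cur2 ++ [pvSljedece p (pvDijelovi st) slovo] else cur2) cur0,
      x ∈ cur0 ∨ x ∈ pvVtail p := by
    intro l
    induction l with
    | nil => intro cur0 x hx; exact Or.inl hx
    | cons a t ih =>
      intro cur0 x hx
      rw [List.foldl_cons] at hx
      rcases ih _ x hx with h | h
      · split at h
        · rcases List.mem_append.mp h with h | h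
          · exact Or.inl h
          · simp at h
            subst h
            exact Or.inr (pvSljedece_mem_Vtail p (pvDijelovi st) a)
        · exact Or.inl h
      · exact Or.inr h
  exact main svi cur

theorem pvFoldlObradi_subset (p : List (String × List (String × List String))) (svi : List String) :
    ∀ (q R : List String), ∀ x ∈ q.foldl (pvObradi p svi) R, x ∈ R ∨ x ∈ pvVtail p := by
  intro q
  induction q with
  | nil => intro R x hx; exact Or.inl hx
  | cons a t ih =>
    intro R x hx
    rcases ih _ x hx with h | h
    · exact (pvObradi_subset p svi R a x h).imp_left id
    · exact Or.inr h

-- one unfolding of B's round loop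
theorem pvBLoop_succ (p : List (String × List (String × List String))) (svi : List String)
    (f : Nat) (R : List String) :
    dohvatljivaStanjaAltPetlja p svi (f + 1) R
    = if R.length = (pvKrug p svi R).length then pvKrug p svi R
      else dohvatljivaStanjaAltPetlja p svi f (pvKrug p svi R) := rfl

-- the main simulation: A's queue loop equals B's round loop
theorem pvMain (p : List (String × List (String × List String))) (svi : List String) (poc : String) :
    ∀ (fb : Nat) (P q : List String) (fa : Nat),
      (∀ st ∈ P, pvSat p svi (P ++ q) st) →
      (P ++ q).Nodup → (P ++ q) ⊆ pvV p poc →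
      ((pvV p poc).length - (P ++ q).length) + q.length ≤ fa →
      ((pvV p poc).length - P.length) + 1 ≤ fb →
      dohvatljivaStanjaPetlja p svi fa (P ++ q) q = dohvatljivaStanjaAltPetlja p svi fb (P ++ q) := by
  intro fb
  induction fb with
  | zero =>
    intro P q fa hsat hnd hsub hfa hfb
    exact absurd hfb (by omega)
  | succ fb ih =>
    intro P q fa hsat hnd hsub hfa hfb
    have hid : P.foldl (pvObradi p svi) (P ++ q) = P ++ q :=
      pvFoldlObradi_id p svi P (P ++ q) hsat
    have hkrug : pvKrug p svi (P ++ q) = q.foldl (pvObradi p svi) (P ++ q) := by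
      unfold pvKrug
      rw [List.foldl_append, hid]
    obtain ⟨news, hnews⟩ := pvFoldlObradi_prefix p svi q (P ++ q)
    have hXlen : (q.foldl (pvObradi p svi) (P ++ q)).length = (P ++ q).length + news.length := by
      rw [← hnews]; simp; omega
    have hdropX : (q.foldl (pvObradi p svi) (P ++ q)).drop (P ++ q).length = news := by
      rw [← hnews]; exact List.drop_left
    have hRle : (P ++ q).length ≤ (pvV p poc).length := (hnd.subperm hsub).length_le
    by_cases hq : q = []
    · subst hq
      rw [pvALoop_nil, pvBLoop_succ, hkrug]
      simp
    · obtain ⟨f', hf'⟩ : ∃ f', fa = q.length + f' := ⟨fa - q.length, by omega⟩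
      rw [hf']
      have hA := pvChunkA p svi q (P ++ q) [] f'
      rw [List.append_nil, List.nil_append] at hA
      rw [hA, hdropX, pvBLoop_succ, hkrug]
      by_cases hn : news = []
      · subst hn
        have hXR : q.foldl (pvObradi p svi) (P ++ q) = P ++ q := by
          rw [← hnews, List.append_nil]
        rw [hXR, pvALoop_nil, if_pos rfl]
      · have hnn : news.length ≠ 0 := by simpa [List.length_eq_zero_iff] using hn
        have hlenne : (P ++ q).length ≠ (q.foldl (pvObradi p svi) (P ++ q)).length := by
          rw [hXlen]; omega
        rw [if_neg hlenne]
        have hXeq : q.foldl (pvObradi p svi) (P ++ q) = (P ++ q) ++ news := hnews.symm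
        rw [hXeq]
        have hndX : ((P ++ q) ++ news).Nodup := by
          rw [← hXeq]; exact pvFoldlObradi_nodup p svi q (P ++ q) hnd
        have hsubX : ((P ++ q) ++ news) ⊆ pvV p poc := by
          intro x hx
          rw [← hXeq] at hx
          rcases pvFoldlObradi_subset p svi q (P ++ q) x hx with h | h
          · exact hsub h
          · exact List.mem_cons_of_mem _ h
        have hXle : (P ++ q).length + news.length ≤ (pvV p poc).length := by
          have := (hndX.subperm hsubX).length_le
          simp only [List.length_append] at this ⊢
          omega
        refine ih (P ++ q) news f' ?_ hndX hsubX ?_ ?_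
        · intro st hst
          rw [← hXeq]
          rcases List.mem_append.mp hst with h | h
          · exact pvSat_mono p svi (P ++ q) _ st (hsat st h)
              (by rw [hXeq]; exact List.subset_append_left _ _)
          · exact pvSat_foldl p svi q (P ++ q) st h
        · simp only [List.length_append] at *
          omega
        · simp only [List.length_append] at *
          have hq1 : 1 ≤ q.length := by
            cases q
            · exact absurd rfl hq
            · simp
          omega

theorem dohvatljivaStanja_eq (p : List (String × List (String × List String))) (poc : String)
    (svi : List String) : dohvatljivaStanja p poc svi = dohvatljivaStanja_alt p poc svi := by
  have hV : (pvV p poc).length = 1 + 2 ^ (pvSortU p).length := by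
    simp [pvV, pvVtail, List.length_sublists]
    omega
  have hm : (pvSortU p).length ≤ (pvSvemir p).length := by
    unfold pvSortU
    rw [PySem.List.length_sorted]
    exact PySem.Set.length_ofList_le _
  have hpow : 2 ^ (pvSortU p).length ≤ 2 ^ (pvSvemir p).length :=
    Nat.pow_le_pow_right (by norm_num) hm
  have h := pvMain p svi poc (pvGorivo p) [] [poc] (pvGorivo p)
    (by intro st hst; simp at hst)
    (by simp)
    (by intro x hx; simp at hx; subst hx; exact List.mem_cons_self ..)
    (by simp only [List.nil_append, List.length_cons, List.length_nil]
        unfold pvGorivo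
        omega)
    (by simp only [List.length_nil]
        unfold pvGorivo
        omega)
  rw [List.nil_append] at h
  exact h

-- ===== VERDICT (by name: the statement is the Claim_ definition above) =====
theorem dohvatljivaStanja_spec : Claim_equal_dohvatljivaStanja := by
  intro p poc svi _ _
  unfold Spec_dohvatljivaStanja
  exact dohvatljivaStanja_eq p poc svi
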